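-- pv_equiv track=rewrite | github.com/woong02022/sheet_to_midi | shape.py | right_same_right_up_left_down
-- ===== SOURCE A (Python) =====
-- def right_same_right_up_left_down(made_finger, current_len):
--     """
--         모두 처리후 오른손 기준으로 제작이 됬으므로 왼손이라면 반전을 시킨다.
--         """
--
--     # 현재 노트의 차이를 계산한다.
--
--     # end finger 를 정하는 과정,
--     # 이때 end finger 는 현재 노트가 2개일때만 사용된다.
--
--     # 개수가 1인 경우는 3, 4, 5의 배수를 돌리고 나머지가 1인 경우 밖에 없음
--     if current_len == 1:
--         made_finger += [1]
--
--     elif current_len == 2: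
--         made_finger += [2, 3]
--
--     # 길이가 3 혹은 3의 배수
--     elif current_len >= 3:
--         num_re = current_len // 3
--         remain = current_len % 3
--         for i in range(0, num_re):
--             made_finger += [1, 2, 3]
--
--         made_finger = right_same_right_up_left_down(made_finger, remain)
--
--         # 3, 4, 5 의 배수 x, 7 이상의 노트들
--         # 무한 루프해서 4개 핑거(1234) 로 채운다음 나머지로 마무리
--
--     return made_finger
-- ===== SOURCE B (Python) =====
-- def right_same_right_up_left_down(made_finger, current_len):
--     # Closed-form per-index generation: element i of the appended pattern is
--     # (i % 3) + 1 inside the full [1,2,3] blocks, and counts up from 1 (when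
--     # current_len % 3 == 1) or from 2 (when it is 2) in the tail. One list
--     # comprehension, no recursion and no block repetition; mutates in place via +=.
--     if current_len >= 1:
--         q, r = divmod(current_len, 3)
--         c = 1 if r == 1 else 2
--         made_finger += [i % 3 + 1 if i < 3 * q else i - 3 * q + c
--                         for i in range(current_len)]
--     return made_finger
-- ===== Notes on version B (the rewrite author's own statement) =====
-- stated objective: alternative
-- what changed: Replaced A's recursive block-appending loop by a single closed-form comprehension over range(current_len) that computes each pattern element directly from its index, with no recursion and no repeated block appends.
import Mathlib
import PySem

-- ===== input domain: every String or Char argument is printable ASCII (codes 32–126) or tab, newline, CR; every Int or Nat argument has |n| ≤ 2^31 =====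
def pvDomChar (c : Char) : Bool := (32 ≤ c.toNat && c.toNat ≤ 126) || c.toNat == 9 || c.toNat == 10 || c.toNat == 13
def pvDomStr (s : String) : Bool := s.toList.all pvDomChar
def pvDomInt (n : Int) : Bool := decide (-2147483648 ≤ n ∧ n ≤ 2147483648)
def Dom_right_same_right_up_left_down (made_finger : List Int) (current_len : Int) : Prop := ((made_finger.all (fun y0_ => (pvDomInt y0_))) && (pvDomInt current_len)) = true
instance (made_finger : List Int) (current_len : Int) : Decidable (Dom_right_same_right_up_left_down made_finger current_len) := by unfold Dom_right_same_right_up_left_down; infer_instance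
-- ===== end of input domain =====

-- B replaces A's recursion + per-block append loop by a single closed-form
-- comprehension computing each pattern element from its index (alternative
-- decomposition). Both Pythons mutate made_finger in place via +=; the
-- equivalence proved here is about the return value.

-- ===== PORT A =====
def right_same_right_up_left_down (made_finger : List Int) (current_len : Int) : List Int :=
  if current_len = 1 then
    made_finger ++ [1]
  else if current_len = 2 then
    made_finger ++ [2, 3]
  else if current_len ≥ 3 then
    let num_re := PySem.Int.floordiv current_len 3
    let remain := PySem.Int.mod current_len 3
    let mf := (PySem.List.pyRange 0 num_re 1).foldl (fun acc _ => acc ++ [1, 2, 3]) made_finger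
    right_same_right_up_left_down mf remain
  else
    made_finger
termination_by current_len.toNat
decreasing_by
  have h1 : 0 ≤ PySem.Int.mod current_len 3 := PySem.Int.mod_nonneg current_len (by norm_num)
  have h2 : PySem.Int.mod current_len 3 < 3 := PySem.Int.mod_lt current_len (by norm_num)
  omega

-- ===== PORT B =====
def right_same_right_up_left_down_alt (made_finger : List Int) (current_len : Int) : List Int :=
  if current_len ≥ 1 then
    let q := PySem.Int.floordiv current_len 3
    let r := PySem.Int.mod current_len 3
    let c : Int := if r = 1 then 1 else 2
    made_finger ++
      (PySem.List.pyRange 0 current_len 1).map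
        (fun i => if i < 3 * q then PySem.Int.mod i 3 + 1 else i - 3 * q + c)
  else
    made_finger

-- ===== PRECONDITION & SPEC =====
def Spec_right_same_right_up_left_down (made_finger : List Int) (current_len : Int) (out : List Int) : Prop := out = right_same_right_up_left_down_alt made_finger current_len
instance (made_finger : List Int) (current_len : Int) (out : List Int) : Decidable (Spec_right_same_right_up_left_down made_finger current_len out) := by unfold Spec_right_same_right_up_left_down; infer_instance

-- ===== CLAIM =====
def Claim_equal_right_same_right_up_left_down : Prop := ∀ (made_finger : List Int) (current_len : Int), Dom_right_same_right_up_left_down made_finger current_len → Spec_right_same_right_up_left_down made_finger current_len (right_same_right_up_left_down made_finger current_len)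

-- ===== LEMMAS AND PROOFS =====

-- Both sides reduce to this canonical form: q full [1,2,3] blocks, then a tail
-- determined by the remainder r (0 → [], 1 → [1], 2 → [2,3]).
def pvTail (r : Int) : List Int := if r = 1 then [1] else if r = 2 then [2, 3] else []

-- A's append loop equals appending the flattened replicated block.
lemma foldl_append_block (xs : List Int) (l : List Int) :
    xs.foldl (fun acc _ => acc ++ [1, 2, 3]) l = l ++ (List.replicate xs.length ([1, 2, 3] : List Int)).flatten := by
  induction xs generalizing l with
  | nil => simp
  | cons x xs ih => simp [List.foldl, ih, List.replicate_succ]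

-- the full blocks, element by element
lemma map_mod_blocks (k : Nat) :
    (List.range (3 * k)).map (fun j : Nat => ((j : Int) % 3 + 1)) = (List.replicate k ([1, 2, 3] : List Int)).flatten := by
  induction k with
  | zero => simp
  | succ k ih =>
    have h3 : 3 * (k + 1) = 3 * k + 3 := by ring
    rw [h3, List.range_add, List.map_append, ih, List.replicate_succ', List.flatten_append]
    congr 1
    simp only [List.range_succ, List.range_zero, List.nil_append, List.map_append,
      List.map_cons, List.map_nil]
    norm_num

-- the comprehension over range(3k+t) equals blocks ++ counting tail
lemma map_formula (k t : Nat) (c : Int) :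
    (List.range (3 * k + t)).map
        (fun j : Nat => if (j : Int) < 3 * (k : Int) then (j : Int) % 3 + 1 else (j : Int) - 3 * (k : Int) + c)
      = (List.replicate k ([1, 2, 3] : List Int)).flatten ++ (List.range t).map (fun j : Nat => (j : Int) + c) := by
  rw [List.range_add, List.map_append]
  congr 1
  · rw [← map_mod_blocks k]
    apply List.map_congr_left
    intro j hj
    have hj' : j < 3 * k := List.mem_range.mp hj
    have : (j : Int) < 3 * (k : Int) := by omega
    simp [this]
  · rw [List.map_map]
    apply List.map_congr_left
    intro j hj
    have hlt : ¬ ((3 * k + j : Nat) : Int) < 3 * (k : Int) := by push_cast; omega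
    simp only [Function.comp, hlt, if_false]
    push_cast
    ring

-- B in canonical form
lemma alt_canonical (mf : List Int) (cl : Int) (h : cl ≥ 1) :
    right_same_right_up_left_down_alt mf cl
      = mf ++ (List.replicate (PySem.Int.floordiv cl 3).toNat ([1, 2, 3] : List Int)).flatten
           ++ pvTail (PySem.Int.mod cl 3) := by
  have h3 : (0 : Int) < 3 := by norm_num
  simp only [right_same_right_up_left_down_alt, if_pos h, PySem.Int.floordiv_eq_ediv_of_pos h3,
    PySem.Int.mod_eq_emod_of_pos h3, PySem.List.pyRange_one, List.map_map]
  have hq0 : 0 ≤ cl / 3 := by omega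
  have hnn : (cl - 0).toNat = 3 * (cl / 3).toNat + (cl % 3).toNat := by omega
  rw [hnn]
  set c : Int := if cl % 3 = 1 then 1 else 2 with hc
  have hmap : ∀ j ∈ List.range (3 * (cl / 3).toNat + (cl % 3).toNat),
      ((fun i : Int => if i < 3 * (cl / 3) then i % 3 + 1 else i - 3 * (cl / 3) + c) ∘ fun k : Nat => 0 + (k : Int)) j
        = (fun j : Nat => if (j : Int) < 3 * (((cl / 3).toNat : Int)) then (j : Int) % 3 + 1
            else (j : Int) - 3 * (((cl / 3).toNat : Int)) + c) j := by
    intro j _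
    have hcast : (((cl / 3).toNat : Int)) = cl / 3 := by omega
    simp [hcast]
  rw [List.map_congr_left hmap, map_formula]
  rw [List.append_assoc]
  congr 2
  have hr03 : 0 ≤ cl % 3 ∧ cl % 3 < 3 := by omega
  have : cl % 3 = 0 ∨ cl % 3 = 1 ∨ cl % 3 = 2 := by omega
  rcases this with h0 | h0 | h0 <;>
    simp [hc, h0, pvTail, List.range_succ]

-- A in canonical form
lemma a_canonical (mf : List Int) (cl : Int) (h : cl ≥ 1) :
    right_same_right_up_left_down mf cl
      = mf ++ (List.replicate (PySem.Int.floordiv cl 3).toNat ([1, 2, 3] : List Int)).flatten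
           ++ pvTail (PySem.Int.mod cl 3) := by
  have h3 : (0 : Int) < 3 := by norm_num
  rw [right_same_right_up_left_down]
  by_cases h1 : cl = 1
  · subst h1; norm_num [pvTail, PySem.Int.floordiv_eq_ediv_of_pos h3, PySem.Int.mod_eq_emod_of_pos h3]
  by_cases h2 : cl = 2
  · subst h2; norm_num [pvTail, PySem.Int.floordiv_eq_ediv_of_pos h3, PySem.Int.mod_eq_emod_of_pos h3]
  have hge : cl ≥ 3 := by omega
  simp only [h1, h2, hge, if_false, if_true]
  rw [foldl_append_block, PySem.List.length_pyRange_one]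
  have hq' : PySem.Int.floordiv cl 3 = cl / 3 := PySem.Int.floordiv_eq_ediv_of_pos h3
  have hr' : PySem.Int.mod cl 3 = cl % 3 := PySem.Int.mod_eq_emod_of_pos h3
  have hr03 : 0 ≤ cl % 3 ∧ cl % 3 < 3 := by omega
  rw [right_same_right_up_left_down]
  have : PySem.Int.mod cl 3 = 0 ∨ PySem.Int.mod cl 3 = 1 ∨ PySem.Int.mod cl 3 = 2 := by omega
  rcases this with h0 | h0 | h0 <;> rw [h0] <;> simp [pvTail, sub_zero, List.append_assoc]

-- ===== VERDICT =====
theorem right_same_right_up_left_down_spec : Claim_equal_right_same_right_up_left_down := by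
  intro mf cl _
  unfold Spec_right_same_right_up_left_down
  by_cases h : cl ≥ 1
  · rw [a_canonical mf cl h, alt_canonical mf cl h]
  · rw [right_same_right_up_left_down, right_same_right_up_left_down_alt]
    have h1 : ¬ cl = 1 := by omega
    have h2 : ¬ cl = 2 := by omega
    have h3 : ¬ cl ≥ 3 := by omega
    simp [h, h1, h2, h3]
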